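-- pv_equiv track=rewrite | github.com/stjur/osm-to-3dm | osm_to_3dm.py | assemble_rings
-- ===== SOURCE A (Python) =====
-- from typing import Dict, IO, Iterable, List, Optional, Sequence, Set, Tuple, Union
--
-- def assemble_rings(node_sequences: Iterable[Sequence[int]]) -> List[List[int]]:
--     """Combine way fragments into closed rings."""
--
--     unused = [list(seq) for seq in node_sequences if len(seq) >= 2]
--     rings: List[List[int]] = []
--
--     while unused:
--         current = unused.pop()
--         if not current:
--             continue
--         ring = list(current)
--         while ring[0] != ring[-1] and unused:
--             tail = ring[-1]
--             joined = False
--             for index, candidate in enumerate(unused):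
--                 if not candidate:
--                     continue
--                 head = candidate[0]
--                 cand_tail = candidate[-1]
--                 if head == tail:
--                     ring.extend(candidate[1:])
--                     unused.pop(index)
--                     joined = True
--                     break
--                 if cand_tail == tail:
--                     ring.extend(reversed(candidate[:-1]))
--                     unused.pop(index)
--                     joined = True
--                     break
--                 if cand_tail == ring[0]:
--                     ring = candidate[:-1] + ring
--                     unused.pop(index)
--                     joined = True
--                     break
--                 if head == ring[0]:
--                     ring = list(reversed(candidate[1:])) + ring
--                     unused.pop(index)
--                     joined = True
--                     break
--             if not joined:
--                 break
--         if ring[0] != ring[-1]: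
--             ring.append(ring[0])
--         rings.append(ring)
--     return rings
-- ===== SOURCE B (Python) =====
-- def assemble_rings(node_sequences):
--     """Combine way fragments into closed rings (endpoint-indexed version)."""
--     frags = [list(seq) for seq in node_sequences if len(seq) >= 2]
--     n = len(frags)
--     by_head = {}
--     by_tail = {}
--     for i, f in enumerate(frags):
--         by_head.setdefault(f[0], set()).add(i)
--         by_tail.setdefault(f[-1], set()).add(i)
--
--     used = [False] * n
--
--     def take(j):
--         f = frags[j]
--         used[j] = True
--         by_head[f[0]].discard(j)
--         by_tail[f[-1]].discard(j)
--
--     rings = []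
--     for start in range(n - 1, -1, -1):
--         if used[start]:
--             continue
--         take(start)
--         ring = list(frags[start])
--         while ring[0] != ring[-1]:
--             t = ring[-1]
--             h = ring[0]
--             cands = set().union(by_head.get(t, ()), by_tail.get(t, ()),
--                                 by_tail.get(h, ()), by_head.get(h, ()))
--             if not cands:
--                 break
--             j = min(cands)
--             c = frags[j]
--             take(j)
--             if c[0] == t:
--                 ring = ring + c[1:]
--             elif c[-1] == t:
--                 ring = ring + c[-2::-1]
--             elif c[-1] == h:
--                 ring = c[:-1] + ring
--             else:
--                 ring = c[1:][::-1] + ring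
--         if ring[0] != ring[-1]:
--             ring.append(ring[0])
--         rings.append(ring)
--     return rings
-- ===== Notes on version B (the rewrite author's own statement) =====
-- stated objective: alternative
-- what changed: Replaces A's positional scan of the shrinking 'unused' list (pop with index shifting) by endpoint dictionaries (node value -> set of fragment ids) plus a used-flag array: each join step picks the minimum-id matching fragment via four dict lookups instead of enumerating the remaining fragments.
import Mathlib
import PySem

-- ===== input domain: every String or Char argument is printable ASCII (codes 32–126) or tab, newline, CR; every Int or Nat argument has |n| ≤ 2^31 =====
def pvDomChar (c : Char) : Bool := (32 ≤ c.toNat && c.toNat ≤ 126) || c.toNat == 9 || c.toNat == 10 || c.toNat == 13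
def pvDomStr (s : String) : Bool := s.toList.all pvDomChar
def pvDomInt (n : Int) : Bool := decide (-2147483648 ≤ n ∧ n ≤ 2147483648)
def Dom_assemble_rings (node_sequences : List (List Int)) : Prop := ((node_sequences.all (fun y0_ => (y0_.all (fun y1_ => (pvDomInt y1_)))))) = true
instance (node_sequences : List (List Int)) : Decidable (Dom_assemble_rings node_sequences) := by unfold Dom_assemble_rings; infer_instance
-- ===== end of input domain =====

-- B replaces A's positional rescans of the shrinking 'unused' list by endpoint dictionaries
-- (node value -> set of fragment ids) plus a used-flag array: objective 'alternative'.

-- ===== PORT A =====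
-- A's inner 'for index, candidate in enumerate(unused)': first candidate passing one of the
-- four endpoint tests (in A's branch order), returning its index and the updated ring.
-- ring[0] / ring[-1] / candidate[0] / candidate[-1] are ported as headI / getLastD 0: exact here,
-- since every ring and candidate reached is nonempty (fragments have >= 2 nodes);
-- candidate[1:] / candidate[:-1] / reversed(...) are List.tail / List.dropLast / List.reverse.
def scanA (ring : List Int) : List (List Int) → Option (Nat × List Int)
  | [] => none
  | c :: rest =>
    if c = [] then (scanA ring rest).map (fun p => (p.1 + 1, p.2))
    else
      let t := ring.getLastD 0
      let h := ring.headI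
      if c.headI = t then some (0, ring ++ c.tail)
      else if c.getLastD 0 = t then some (0, ring ++ c.dropLast.reverse)
      else if c.getLastD 0 = h then some (0, c.dropLast ++ ring)
      else if c.headI = h then some (0, c.tail.reverse ++ ring)
      else (scanA ring rest).map (fun p => (p.1 + 1, p.2))

-- A's inner while loop; the fuel argument (called with the current length of 'unused') only
-- makes the recursion structural: each iteration requires 'unused' nonempty and removes one element.
def innerA : Nat → List Int → List (List Int) → List Int × List (List Int)
  | 0, ring, unused => (ring, unused)
  | fuel + 1, ring, unused =>
    if ring.headI ≠ ring.getLastD 0 ∧ unused ≠ [] then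
      match scanA ring unused with
      | some (k, ring') => innerA fuel ring' (unused.eraseIdx k)
      | none => (ring, unused)
    else (ring, unused)

-- A's outer while loop ('current = unused.pop()'); fuel = initial length, again only for totality.
def outerA : Nat → List (List Int) → List (List Int) → List (List Int)
  | 0, _, rings => rings
  | fuel + 1, unused, rings =>
    match unused.getLast? with
    | none => rings
    | some current =>
      let rest := unused.dropLast
      if current = [] then outerA fuel rest rings
      else
        let p := innerA rest.length current rest
        let ring := if p.1.headI ≠ p.1.getLastD 0 then p.1 ++ [p.1.headI] else p.1
        outerA fuel p.2 (rings ++ [ring])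

def assemble_rings (node_sequences : List (List Int)) : List (List Int) :=
  let unused := node_sequences.filter (fun s => 2 ≤ s.length)
  outerA unused.length unused []

-- ===== PORT B =====
-- B's mutable state: (used flags, by_head, by_tail); fragment ids are the positions 0..n-1.
-- Python's sets of ids are PySem.Set Nat; the two dicts are built in one pass over enumerate(frags).
def buildIdxB (frags : List (List Int)) :
    PySem.Dict Int (PySem.Set Nat) × PySem.Dict Int (PySem.Set Nat) :=
  frags.zipIdx.foldl
    (fun d p => (d.1.modify p.1.headI PySem.Set.empty (fun s => s.add p.2),
                 d.2.modify (p.1.getLastD 0) PySem.Set.empty (fun s => s.add p.2)))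
    (PySem.Dict.empty, PySem.Dict.empty)

-- B's take(j): mark j used and discard it from both endpoint buckets ('modify' with the
-- empty-set default is exact for Python's by_head[f[0]].discard(j): the key is always present).
def takeB (frags : List (List Int)) (j : Nat)
    (st : List Bool × PySem.Dict Int (PySem.Set Nat) × PySem.Dict Int (PySem.Set Nat)) :
    List Bool × PySem.Dict Int (PySem.Set Nat) × PySem.Dict Int (PySem.Set Nat) :=
  let f := frags.getD j []
  (st.1.set j true,
   st.2.1.modify f.headI PySem.Set.empty (fun s => s.discard j),
   st.2.2.modify (f.getLastD 0) PySem.Set.empty (fun s => s.discard j))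

-- B's inner while loop; fuel (= number of unused fragments at entry) only makes it total.
def innerB (frags : List (List Int)) :
    Nat → List Int → (List Bool × PySem.Dict Int (PySem.Set Nat) × PySem.Dict Int (PySem.Set Nat)) →
    List Int × (List Bool × PySem.Dict Int (PySem.Set Nat) × PySem.Dict Int (PySem.Set Nat))
  | 0, ring, st => (ring, st)
  | fuel + 1, ring, st =>
    if ring.headI ≠ ring.getLastD 0 then
      let t := ring.getLastD 0
      let h := ring.headI
      let cands := ((((PySem.Set.empty : PySem.Set Nat).union
          (st.2.1.getD t PySem.Set.empty)).union (st.2.2.getD t PySem.Set.empty)).union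
          (st.2.2.getD h PySem.Set.empty)).union (st.2.1.getD h PySem.Set.empty)
      if cands = [] then (ring, st)
      else
        match PySem.List.min? cands (fun x => x) with
        | none => (ring, st)   -- unreachable: cands ≠ []
        | some j =>
          let c := frags.getD j []
          let st' := takeB frags j st
          let ring' :=
            if c.headI = t then ring ++ c.tail
            else if c.getLastD 0 = t then ring ++ c.dropLast.reverse
            else if c.getLastD 0 = h then c.dropLast ++ ring
            else c.tail.reverse ++ ring
          innerB frags fuel ring' st'
    else (ring, st)

-- B's outer 'for start in range(n-1, -1, -1)': structural countdown on start+1.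
def outerB (frags : List (List Int)) :
    Nat → (List Bool × PySem.Dict Int (PySem.Set Nat) × PySem.Dict Int (PySem.Set Nat)) →
    List (List Int) → List (List Int)
  | 0, _, rings => rings
  | s + 1, st, rings =>
    if st.1.getD s true then outerB frags s st rings
    else
      let st1 := takeB frags s st
      let p := innerB frags (st1.1.count false) (frags.getD s []) st1
      let ring := if p.1.headI ≠ p.1.getLastD 0 then p.1 ++ [p.1.headI] else p.1
      outerB frags s p.2 (rings ++ [ring])

def assemble_rings_alt (node_sequences : List (List Int)) : List (List Int) :=
  let frags := node_sequences.filter (fun s => 2 ≤ s.length)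
  outerB frags frags.length (List.replicate frags.length false, buildIdxB frags) []

-- ===== PRECONDITION & SPEC =====
def Spec_assemble_rings (node_sequences : List (List Int)) (out : List (List Int)) : Prop := out = assemble_rings_alt node_sequences
instance (node_sequences : List (List Int)) (out : List (List Int)) : Decidable (Spec_assemble_rings node_sequences out) := by unfold Spec_assemble_rings; infer_instance

-- ===== CLAIM (what is proved, stated in full; the proofs are below) =====
def Claim_equal_assemble_rings : Prop := ∀ (node_sequences : List (List Int)), Dom_assemble_rings node_sequences → Spec_assemble_rings node_sequences (assemble_rings node_sequences)

-- ===== LEMMAS AND PROOFS =====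

-- ids of the not-yet-used fragments, in increasing order
def aliveL (used : List Bool) : List Nat :=
  (List.range used.length).filter (fun i => !used.getD i true)

-- the unused list A maintains, reconstructed from B's used flags
def unusedOf (frags : List (List Int)) (used : List Bool) : List (List Int) :=
  (aliveL used).map (fun i => frags.getD i [])

-- the four endpoint tests of one candidate, as one predicate
def pmB (h t : Int) (c : List Int) : Bool :=
  decide (c.headI = t) || decide (c.getLastD 0 = t) || decide (c.getLastD 0 = h) || decide (c.headI = h)

-- the ring update both programs perform on the chosen candidate (A's branch order)
def joinRing (ring c : List Int) : List Int :=
  let t := ring.getLastD 0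
  let h := ring.headI
  if c.headI = t then ring ++ c.tail
  else if c.getLastD 0 = t then ring ++ c.dropLast.reverse
  else if c.getLastD 0 = h then c.dropLast ++ ring
  else c.tail.reverse ++ ring

-- B's state invariant: one flag per fragment, and each endpoint bucket holds exactly the
-- unused ids with that endpoint
def RelB (frags : List (List Int))
    (st : List Bool × PySem.Dict Int (PySem.Set Nat) × PySem.Dict Int (PySem.Set Nat)) : Prop :=
  st.1.length = frags.length ∧
  (∀ (v : Int) (i : Nat), i ∈ st.2.1.getD v PySem.Set.empty ↔
      i ∈ aliveL st.1 ∧ (frags.getD i []).headI = v) ∧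
  (∀ (v : Int) (i : Nat), i ∈ st.2.2.getD v PySem.Set.empty ↔
      i ∈ aliveL st.1 ∧ (frags.getD i []).getLastD 0 = v)

def Goodf (frags : List (List Int)) : Prop := ∀ f ∈ frags, 2 ≤ f.length

lemma mem_aliveL (used : List Bool) (i : Nat) :
    i ∈ aliveL used ↔ i < used.length ∧ used.getD i true = false := by
  simp [aliveL, List.mem_filter, List.mem_range]

lemma aliveL_pairwise (used : List Bool) : (aliveL used).Pairwise (· < ·) :=
  List.Pairwise.filter _ List.pairwise_lt_range

lemma aliveL_nodup (used : List Bool) : (aliveL used).Nodup :=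
  (aliveL_pairwise used).imp Nat.ne_of_lt

lemma length_aliveL (used : List Bool) : (aliveL used).length = used.count false := by
  induction used with
  | nil => rfl
  | cons b us ih =>
    have h1 : aliveL (b :: us) =
        (if !b then [0] else []) ++
          (List.map Nat.succ ((List.range us.length).filter (fun i => !us.getD i true))) := by
      simp only [aliveL, List.length_cons, List.range_succ_eq_map, List.filter_cons,
        List.getD_cons_zero, List.filter_map]
      cases b <;> simp [Function.comp_def]
    rw [h1]
    simp only [List.length_append, List.length_map]
    have h2 : ((List.range us.length).filter (fun i => !us.getD i true)).length = us.count false := ih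
    rw [show ((List.range us.length).filter (fun i => !us.getD i true)) = aliveL us from rfl] at h2
    rw [show ((List.range us.length).filter (fun i => !us.getD i true)) = aliveL us from rfl]
    rw [h2, List.count_cons]
    cases b <;> simp [Nat.add_comm]

lemma aliveL_set (used : List Bool) (j : Nat) (hj : j < used.length) :
    aliveL (used.set j true) = (aliveL used).filter (fun i => decide (i ≠ j)) := by
  unfold aliveL
  rw [List.length_set, List.filter_filter]
  apply List.filter_congr
  intro i hi
  rw [List.mem_range] at hi
  by_cases hij : i = j
  · subst hij
    simp [List.getD_eq_getElem?_getD, List.getElem?_set, hj]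
  · have hji : j ≠ i := Ne.symm hij
    simp [List.getD_eq_getElem?_getD, List.getElem?_set, hji, hij]

lemma filter_ne_getElem_eq_eraseIdx (l : List Nat) (hnd : l.Nodup) (k : Nat) (hk : k < l.length) :
    l.filter (fun i => decide (i ≠ l[k])) = l.eraseIdx k := by
  induction l generalizing k with
  | nil => simp at hk
  | cons a tl ih =>
    cases k with
    | zero =>
      simp only [List.getElem_cons_zero, List.eraseIdx_cons_zero, List.filter_cons]
      have ha : a ∉ tl := (List.nodup_cons.mp hnd).1
      split_ifs with hsp
      · simp at hsp
      apply List.filter_eq_self.mpr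
      intro x hx
      simp only [decide_eq_true_eq]
      intro hxa; exact ha (hxa ▸ hx)
    | succ k' =>
      have hk' : k' < tl.length := by simpa using hk
      simp only [List.getElem_cons_succ, List.eraseIdx_cons_succ, List.filter_cons]
      have ha : a ∉ tl := (List.nodup_cons.mp hnd).1
      have hane : a ≠ tl[k'] := fun h => ha (h ▸ List.getElem_mem hk')
      split_ifs with hsp
      · exact congrArg (fun l => a :: l) (ih (List.nodup_cons.mp hnd).2 k' hk')
      · exact absurd (by simp [hane]) hsp

lemma scanA_none (ring : List Int) (unused : List (List Int))
    (hne : ∀ c ∈ unused, c ≠ [])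
    (hno : ∀ c ∈ unused, pmB ring.headI (ring.getLastD 0) c = false) :
    scanA ring unused = none := by
  induction unused with
  | nil => rfl
  | cons c rest ih =>
    have hnec : c ≠ [] := hne c (List.mem_cons_self ..)
    have hpc := hno c (List.mem_cons_self ..)
    simp only [pmB, Bool.or_eq_false_iff, decide_eq_false_iff_not] at hpc
    obtain ⟨⟨⟨h1, h2⟩, h3⟩, h4⟩ := hpc
    simp only [scanA]
    rw [if_neg hnec, if_neg h1, if_neg h2, if_neg h3, if_neg h4,
      ih (fun c hc => hne c (List.mem_cons_of_mem _ hc))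
         (fun c hc => hno c (List.mem_cons_of_mem _ hc))]
    rfl

lemma scanA_found (ring : List Int) (unused : List (List Int))
    (hne : ∀ c ∈ unused, c ≠ [])
    (hex : ∃ c ∈ unused, pmB ring.headI (ring.getLastD 0) c = true) :
    ∃ (hk : List.findIdx (pmB ring.headI (ring.getLastD 0)) unused < unused.length),
      scanA ring unused = some (List.findIdx (pmB ring.headI (ring.getLastD 0)) unused,
        joinRing ring unused[List.findIdx (pmB ring.headI (ring.getLastD 0)) unused]) := by
  induction unused with
  | nil => simp at hex
  | cons c rest ih =>
    have hnec : c ≠ [] := hne c (List.mem_cons_self ..)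
    by_cases hpc : pmB ring.headI (ring.getLastD 0) c = true
    · have hfi : List.findIdx (pmB ring.headI (ring.getLastD 0)) (c :: rest) = 0 := by
        rw [List.findIdx_cons]
        simp only [hpc, cond_true]
      refine ⟨by simp only [hfi, List.length_cons]; omega, ?_⟩
      simp only [hfi, List.getElem_cons_zero]
      simp only [pmB, Bool.or_eq_true, decide_eq_true_eq] at hpc
      simp only [scanA, joinRing]
      rw [if_neg hnec]
      split_ifs <;> first | rfl | tauto
    · have hpc' : pmB ring.headI (ring.getLastD 0) c = false := by
        revert hpc; cases hb : pmB ring.headI (ring.getLastD 0) c <;> simp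
      have hexr : ∃ c' ∈ rest, pmB ring.headI (ring.getLastD 0) c' = true := by
        obtain ⟨c', hc', hp'⟩ := hex
        rcases List.mem_cons.mp hc' with h | h
        · subst h; rw [hp'] at hpc'; cases hpc'
        · exact ⟨c', h, hp'⟩
      obtain ⟨hk, heq⟩ := ih (fun c hc => hne c (List.mem_cons_of_mem _ hc)) hexr
      have hfi : List.findIdx (pmB ring.headI (ring.getLastD 0)) (c :: rest) =
          List.findIdx (pmB ring.headI (ring.getLastD 0)) rest + 1 := by
        rw [List.findIdx_cons]
        simp only [hpc', cond_false]
      refine ⟨by simp only [hfi, List.length_cons]; omega, ?_⟩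
      have hpc'' := hpc'
      simp only [pmB, Bool.or_eq_false_iff, decide_eq_false_iff_not] at hpc''
      obtain ⟨⟨⟨h1, h2⟩, h3⟩, h4⟩ := hpc''
      simp only [hfi, List.getElem_cons_succ, scanA]
      rw [if_neg hnec, if_neg h1, if_neg h2, if_neg h3, if_neg h4, heq]
      rfl

-- in a strictly increasing list, the minimal element satisfying q sits at findIdx q
lemma min_at_findIdx (l : List Nat) (hp : l.Pairwise (· < ·)) (q : Nat → Bool) (j : Nat)
    (hjm : j ∈ l) (hjq : q j = true) (hmin : ∀ y ∈ l, q y = true → j ≤ y) :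
    ∃ (hk : List.findIdx q l < l.length), l[List.findIdx q l] = j := by
  have hk : List.findIdx q l < l.length := List.findIdx_lt_length.mpr ⟨j, hjm, hjq⟩
  refine ⟨hk, ?_⟩
  have h1 : q l[List.findIdx q l] = true := List.findIdx_getElem (w := hk)
  have h2 : j ≤ l[List.findIdx q l] := hmin _ (List.getElem_mem hk) h1
  obtain ⟨pj, hpj, hej⟩ := List.getElem_of_mem hjm
  have h3 : List.findIdx q l ≤ pj := by
    by_contra hcon
    push_neg at hcon
    have hfalse := List.not_of_lt_findIdx hcon
    have h5 : q l[pj] = true := by rw [hej]; exact hjq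
    exact Bool.false_ne_true (hfalse.symm.trans h5)
  rcases Nat.eq_or_lt_of_le h3 with he | hlt
  · rw [← hej]; congr 1
  · have hmono := List.pairwise_iff_getElem.mp hp _ _ hk hpj hlt
    rw [hej] at hmono
    omega

lemma takeB_rel (frags : List (List Int))
    (st : List Bool × PySem.Dict Int (PySem.Set Nat) × PySem.Dict Int (PySem.Set Nat))
    (j : Nat) (hR : RelB frags st) (hj : j ∈ aliveL st.1) :
    RelB frags (takeB frags j st) ∧
    aliveL (takeB frags j st).1 = (aliveL st.1).filter (fun i => decide (i ≠ j)) := by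
  obtain ⟨hlen, hbh, hbt⟩ := hR
  have hjlt : j < st.1.length := ((mem_aliveL _ _).mp hj).1
  have halive : aliveL (takeB frags j st).1 = (aliveL st.1).filter (fun i => decide (i ≠ j)) :=
    aliveL_set st.1 j hjlt
  refine ⟨⟨by simpa [takeB] using hlen, ?_, ?_⟩, halive⟩
  · intro v i
    show i ∈ (st.2.1.modify (frags.getD j []).headI PySem.Set.empty
        (fun s => s.discard j)).getD v PySem.Set.empty ↔ _
    rw [PySem.Dict.getD_modify]
    by_cases hv : v = (frags.getD j []).headI
    · subst hv
      rw [if_pos rfl, PySem.Set.mem_discard, hbh, halive, List.mem_filter]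
      simp only [decide_eq_true_eq]
      constructor
      · rintro ⟨⟨ha, hh⟩, hne⟩; exact ⟨⟨ha, hne⟩, hh⟩
      · rintro ⟨⟨ha, hne⟩, hh⟩; exact ⟨⟨ha, hh⟩, hne⟩
    · rw [if_neg hv, hbh, halive, List.mem_filter]
      simp only [decide_eq_true_eq]
      constructor
      · rintro ⟨ha, hh⟩
        refine ⟨⟨ha, fun he => hv ?_⟩, hh⟩
        rw [← hh, he]
      · rintro ⟨⟨ha, _⟩, hh⟩; exact ⟨ha, hh⟩
  · intro v i
    show i ∈ (st.2.2.modify ((frags.getD j []).getLastD 0) PySem.Set.empty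
        (fun s => s.discard j)).getD v PySem.Set.empty ↔ _
    rw [PySem.Dict.getD_modify]
    by_cases hv : v = (frags.getD j []).getLastD 0
    · subst hv
      rw [if_pos rfl, PySem.Set.mem_discard, hbt, halive, List.mem_filter]
      simp only [decide_eq_true_eq]
      constructor
      · rintro ⟨⟨ha, hh⟩, hne⟩; exact ⟨⟨ha, hne⟩, hh⟩
      · rintro ⟨⟨ha, hne⟩, hh⟩; exact ⟨⟨ha, hh⟩, hne⟩
    · rw [if_neg hv, hbt, halive, List.mem_filter]
      simp only [decide_eq_true_eq]
      constructor
      · rintro ⟨ha, hh⟩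
        refine ⟨⟨ha, fun he => hv ?_⟩, hh⟩
        rw [← hh, he]
      · rintro ⟨⟨ha, _⟩, hh⟩; exact ⟨ha, hh⟩

lemma buildIdx_fold_mem (l : List (List Int × Nat))
    (d : PySem.Dict Int (PySem.Set Nat) × PySem.Dict Int (PySem.Set Nat)) (v : Int) (i : Nat) :
    (i ∈ (l.foldl
        (fun d p => (d.1.modify p.1.headI PySem.Set.empty (fun s => s.add p.2),
                     d.2.modify (p.1.getLastD 0) PySem.Set.empty (fun s => s.add p.2))) d).1.getD v
          PySem.Set.empty ↔
      i ∈ d.1.getD v PySem.Set.empty ∨ ∃ p ∈ l, p.2 = i ∧ p.1.headI = v) ∧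
    (i ∈ (l.foldl
        (fun d p => (d.1.modify p.1.headI PySem.Set.empty (fun s => s.add p.2),
                     d.2.modify (p.1.getLastD 0) PySem.Set.empty (fun s => s.add p.2))) d).2.getD v
          PySem.Set.empty ↔
      i ∈ d.2.getD v PySem.Set.empty ∨ ∃ p ∈ l, p.2 = i ∧ p.1.getLastD 0 = v) := by
  induction l generalizing d with
  | nil => simp
  | cons p rest ih =>
    simp only [List.foldl_cons]
    constructor
    · rw [(ih _).1]
      show (i ∈ (d.1.modify p.1.headI PySem.Set.empty (fun s => s.add p.2)).getD v
          PySem.Set.empty ∨ _) ↔ _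
      rw [PySem.Dict.getD_modify]
      by_cases hv : v = p.1.headI
      · rw [if_pos hv, PySem.Set.mem_add]
        subst hv
        simp only [List.mem_cons]
        constructor
        · rintro (⟨hm | he⟩ | ⟨q, hq, h1, h2⟩)
          · exact Or.inl hm
          · exact Or.inr ⟨p, Or.inl rfl, he.symm, rfl⟩
          · exact Or.inr ⟨q, Or.inr hq, h1, h2⟩
        · rintro (hm | ⟨q, hq | hq, h1, h2⟩)
          · exact Or.inl (Or.inl hm)
          · exact Or.inl (Or.inr (by rw [← h1, hq]))
          · exact Or.inr ⟨q, hq, h1, h2⟩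
      · rw [if_neg hv]
        simp only [List.mem_cons]
        constructor
        · rintro (hm | ⟨q, hq, h1, h2⟩)
          · exact Or.inl hm
          · exact Or.inr ⟨q, Or.inr hq, h1, h2⟩
        · rintro (hm | ⟨q, hq | hq, h1, h2⟩)
          · exact Or.inl hm
          · exact absurd (hq ▸ h2).symm hv
          · exact Or.inr ⟨q, hq, h1, h2⟩
    · rw [(ih _).2]
      show (i ∈ (d.2.modify (p.1.getLastD 0) PySem.Set.empty (fun s => s.add p.2)).getD v
          PySem.Set.empty ∨ _) ↔ _
      rw [PySem.Dict.getD_modify]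
      by_cases hv : v = p.1.getLastD 0
      · rw [if_pos hv, PySem.Set.mem_add]
        subst hv
        simp only [List.mem_cons]
        constructor
        · rintro (⟨hm | he⟩ | ⟨q, hq, h1, h2⟩)
          · exact Or.inl hm
          · exact Or.inr ⟨p, Or.inl rfl, he.symm, rfl⟩
          · exact Or.inr ⟨q, Or.inr hq, h1, h2⟩
        · rintro (hm | ⟨q, hq | hq, h1, h2⟩)
          · exact Or.inl (Or.inl hm)
          · exact Or.inl (Or.inr (by rw [← h1, hq]))
          · exact Or.inr ⟨q, hq, h1, h2⟩
      · rw [if_neg hv]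
        simp only [List.mem_cons]
        constructor
        · rintro (hm | ⟨q, hq, h1, h2⟩)
          · exact Or.inl hm
          · exact Or.inr ⟨q, Or.inr hq, h1, h2⟩
        · rintro (hm | ⟨q, hq | hq, h1, h2⟩)
          · exact Or.inl hm
          · exact absurd (hq ▸ h2).symm hv
          · exact Or.inr ⟨q, hq, h1, h2⟩

lemma buildIdxB_mem (frags : List (List Int)) (v : Int) (i : Nat) :
    (i ∈ (buildIdxB frags).1.getD v PySem.Set.empty ↔
      i < frags.length ∧ (frags.getD i []).headI = v) ∧
    (i ∈ (buildIdxB frags).2.getD v PySem.Set.empty ↔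
      i < frags.length ∧ (frags.getD i []).getLastD 0 = v) := by
  have hzip : ∀ (P : List Int → Prop), (∃ p ∈ frags.zipIdx, p.2 = i ∧ P p.1) ↔
      (i < frags.length ∧ P (frags.getD i [])) := by
    intro P
    constructor
    · rintro ⟨⟨c, k⟩, hmem, hki, hP⟩
      obtain ⟨-, hlt, hc⟩ := List.mem_zipIdx hmem
      simp only at hki hP
      subst hki
      simp only [Nat.zero_add] at hlt
      refine ⟨hlt, ?_⟩
      rw [List.getD_eq_getElem _ _ hlt]
      rw [hc] at hP
      exact hP
    · rintro ⟨hlt, hP⟩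
      have hzl : i < (frags.zipIdx 0).length := by simpa using hlt
      refine ⟨(frags[i], i), ?_, rfl, ?_⟩
      · have hge := List.getElem_zipIdx (l := frags) (j := 0) hzl
        rw [Nat.zero_add] at hge
        exact hge ▸ List.getElem_mem hzl
      · rwa [List.getD_eq_getElem _ _ hlt] at hP
  have hb := buildIdx_fold_mem frags.zipIdx (PySem.Dict.empty, PySem.Dict.empty) v i
  have hememp : i ∈ (PySem.Set.empty : PySem.Set Nat) ↔ False := by
    simp [PySem.Set.empty]
  constructor
  · rw [show (buildIdxB frags).1 = (frags.zipIdx.foldl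
        (fun d p => (d.1.modify p.1.headI PySem.Set.empty (fun s => s.add p.2),
                     d.2.modify (p.1.getLastD 0) PySem.Set.empty (fun s => s.add p.2)))
        (PySem.Dict.empty, PySem.Dict.empty)).1 from rfl, hb.1, PySem.Dict.getD_empty,
      hememp, false_or]
    exact hzip (fun c => c.headI = v)
  · rw [show (buildIdxB frags).2 = (frags.zipIdx.foldl
        (fun d p => (d.1.modify p.1.headI PySem.Set.empty (fun s => s.add p.2),
                     d.2.modify (p.1.getLastD 0) PySem.Set.empty (fun s => s.add p.2)))
        (PySem.Dict.empty, PySem.Dict.empty)).2 from rfl, hb.2, PySem.Dict.getD_empty,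
      hememp, false_or]
    exact hzip (fun c => c.getLastD 0 = v)

lemma inner_sim (frags : List (List Int)) (hG : Goodf frags) :
    ∀ (fuel : Nat) (ring : List Int)
      (st : List Bool × PySem.Dict Int (PySem.Set Nat) × PySem.Dict Int (PySem.Set Nat)),
      RelB frags st →
      (innerA fuel ring (unusedOf frags st.1)).1 = (innerB frags fuel ring st).1 ∧
      RelB frags (innerB frags fuel ring st).2 ∧
      (innerA fuel ring (unusedOf frags st.1)).2 = unusedOf frags (innerB frags fuel ring st).2.1 ∧
      aliveL (innerB frags fuel ring st).2.1 ⊆ aliveL st.1 := by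
  intro fuel
  induction fuel with
  | zero => exact fun ring st hR => ⟨rfl, hR, rfl, fun _ hi => hi⟩
  | succ f ih =>
    intro ring st hR
    obtain ⟨hlen, hbh, hbt⟩ := hR
    by_cases hopen : ring.headI ≠ ring.getLastD 0
    · set C : PySem.Set Nat := ((((PySem.Set.empty : PySem.Set Nat).union
          (st.2.1.getD (ring.getLastD 0) PySem.Set.empty)).union
          (st.2.2.getD (ring.getLastD 0) PySem.Set.empty)).union
          (st.2.2.getD ring.headI PySem.Set.empty)).union
          (st.2.1.getD ring.headI PySem.Set.empty) with hC
      have hememp : ∀ i : Nat, i ∈ (PySem.Set.empty : PySem.Set Nat) ↔ False := by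
        simp [PySem.Set.empty]
      have hmemC : ∀ i : Nat, i ∈ C ↔
          i ∈ aliveL st.1 ∧ pmB ring.headI (ring.getLastD 0) (frags.getD i []) = true := by
        intro i
        rw [hC]
        simp only [PySem.Set.mem_union, hememp, false_or, hbh, hbt, pmB, Bool.or_eq_true,
          decide_eq_true_eq]
        tauto
      have hne : ∀ c ∈ unusedOf frags st.1, c ≠ [] := by
        intro c hc
        obtain ⟨i, hi, rfl⟩ := List.mem_map.mp hc
        have hilt : i < frags.length := hlen ▸ ((mem_aliveL _ _).mp hi).1
        rw [List.getD_eq_getElem _ _ hilt]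
        have hg := hG _ (List.getElem_mem hilt)
        intro hnil
        rw [hnil] at hg
        simp at hg
      by_cases hex : ∃ i ∈ aliveL st.1, pmB ring.headI (ring.getLastD 0) (frags.getD i []) = true
      · obtain ⟨j0, hj0a, hj0p⟩ := hex
        have hCne : C ≠ [] := List.ne_nil_of_mem ((hmemC j0).mpr ⟨hj0a, hj0p⟩)
        rcases hm : PySem.List.min? C (fun x => x) with _ | j
        · rw [PySem.List.min?_eq_none_iff] at hm
          exact absurd hm hCne
        · have hjC := (hmemC j).mp (PySem.List.min?_mem hm)
          have hjmin : ∀ y ∈ aliveL st.1,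
              pmB ring.headI (ring.getLastD 0) (frags.getD y []) = true → j ≤ y := fun y hy hp =>
            PySem.List.min?_isMin hm y ((hmemC y).mpr ⟨hy, hp⟩)
          obtain ⟨hk', hkel'⟩ := min_at_findIdx (aliveL st.1) (aliveL_pairwise st.1)
            (fun i => pmB ring.headI (ring.getLastD 0) (frags.getD i [])) j hjC.1 hjC.2 hjmin
          have hfidx : List.findIdx (pmB ring.headI (ring.getLastD 0)) (unusedOf frags st.1) =
              List.findIdx (fun i => pmB ring.headI (ring.getLastD 0) (frags.getD i []))
                (aliveL st.1) := by
            rw [unusedOf, List.findIdx_map]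
            rfl
          have hexU : ∃ c ∈ unusedOf frags st.1,
              pmB ring.headI (ring.getLastD 0) c = true :=
            ⟨frags.getD j [], List.mem_map_of_mem hjC.1, hjC.2⟩
          obtain ⟨cW, hcW, -⟩ := hexU
          have hune : unusedOf frags st.1 ≠ [] := List.ne_nil_of_mem hcW
          obtain ⟨hkA, hscan⟩ := scanA_found ring (unusedOf frags st.1) hne
            ⟨frags.getD j [], List.mem_map_of_mem hjC.1, hjC.2⟩
          have hgetU : (unusedOf frags st.1)[List.findIdx
              (pmB ring.headI (ring.getLastD 0)) (unusedOf frags st.1)]'hkA =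
              frags.getD j [] := by
            rw [List.getElem_eq_iff, hfidx]
            show (unusedOf frags st.1)[_]? = _
            rw [unusedOf, List.getElem?_map, List.getElem?_eq_getElem hk', hkel']
            rfl
          have eA : innerA (f + 1) ring (unusedOf frags st.1) =
              innerA f (joinRing ring (frags.getD j []))
                ((unusedOf frags st.1).eraseIdx
                  (List.findIdx (pmB ring.headI (ring.getLastD 0)) (unusedOf frags st.1))) := by
            simp only [innerA]
            rw [if_pos ⟨hopen, hune⟩]
            simp only [hscan]
            rw [hgetU]
          obtain ⟨hRel', halive'⟩ := takeB_rel frags st j ⟨hlen, hbh, hbt⟩ hjC.1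
          have hErase : (unusedOf frags st.1).eraseIdx
              (List.findIdx (pmB ring.headI (ring.getLastD 0)) (unusedOf frags st.1)) =
              unusedOf frags (takeB frags j st).1 := by
            rw [hfidx]
            simp only [unusedOf]
            rw [List.eraseIdx_map,
              ← filter_ne_getElem_eq_eraseIdx (aliveL st.1) (aliveL_nodup st.1) _ hk',
              hkel', halive']
          have eB : innerB frags (f + 1) ring st =
              innerB frags f (joinRing ring (frags.getD j [])) (takeB frags j st) := by
            simp only [innerB]
            rw [if_pos hopen, ← hC, if_neg hCne, hm]
            rfl
          rw [eA, eB, hErase]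
          obtain ⟨g1, g2, g3, g4⟩ := ih (joinRing ring (frags.getD j [])) (takeB frags j st) hRel'
          refine ⟨g1, g2, g3, fun i hi => ?_⟩
          have hsub := g4 hi
          rw [halive'] at hsub
          exact (List.mem_filter.mp hsub).1
      · have hCnil : C = [] := by
          rw [List.eq_nil_iff_forall_not_mem]
          intro i hi
          exact hex ⟨i, ((hmemC i).mp hi).1, ((hmemC i).mp hi).2⟩
        have eB : innerB frags (f + 1) ring st = (ring, st) := by
          simp only [innerB]
          rw [if_pos hopen, ← hC, if_pos hCnil]
        by_cases hun : unusedOf frags st.1 = []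
        · have eA : innerA (f + 1) ring (unusedOf frags st.1) = (ring, unusedOf frags st.1) := by
            simp only [innerA]
            rw [if_neg (by simp [hun])]
          rw [eA, eB]
          exact ⟨rfl, ⟨hlen, hbh, hbt⟩, rfl, fun _ hi => hi⟩
        · have hnom : ∀ c ∈ unusedOf frags st.1,
              pmB ring.headI (ring.getLastD 0) c = false := by
            intro c hc
            obtain ⟨i, hi, rfl⟩ := List.mem_map.mp hc
            by_contra hcon
            simp only [Bool.not_eq_false] at hcon
            exact hex ⟨i, hi, hcon⟩
          have eA : innerA (f + 1) ring (unusedOf frags st.1) = (ring, unusedOf frags st.1) := by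
            simp only [innerA]
            rw [if_pos ⟨hopen, hun⟩]
            simp only [scanA_none ring _ hne hnom]
          rw [eA, eB]
          exact ⟨rfl, ⟨hlen, hbh, hbt⟩, rfl, fun _ hi => hi⟩
    · have eA : innerA (f + 1) ring (unusedOf frags st.1) = (ring, unusedOf frags st.1) := by
        simp only [innerA]
        rw [if_neg (fun hc => hopen hc.1)]
      have eB : innerB frags (f + 1) ring st = (ring, st) := by
        simp only [innerB]
        rw [if_neg hopen]
      rw [eA, eB]
      exact ⟨rfl, ⟨hlen, hbh, hbt⟩, rfl, fun _ hi => hi⟩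

lemma outerA_nil (fuel : Nat) (rings : List (List Int)) : outerA fuel [] rings = rings := by
  cases fuel <;> simp [outerA]

lemma getLast?_eq_max (l : List Nat) (hp : l.Pairwise (· < ·)) (s : Nat)
    (hs : s ∈ l) (hmax : ∀ i ∈ l, i ≤ s) : l.getLast? = some s := by
  have hne : l ≠ [] := List.ne_nil_of_mem hs
  rw [List.getLast?_eq_getLast hne]
  congr 1
  obtain ⟨pj, hpj, hej⟩ := List.getElem_of_mem hs
  rw [List.getLast_eq_getElem]
  have hlpos : 0 < l.length := List.length_pos_of_ne_nil hne
  by_cases hps : pj = l.length - 1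
  · subst hps
    exact hej
  · have hlt : pj < l.length - 1 := by omega
    have hmono := List.pairwise_iff_getElem.mp hp pj (l.length - 1) hpj (by omega) hlt
    rw [hej] at hmono
    have hle := hmax _ (List.getElem_mem (show l.length - 1 < l.length by omega))
    omega

lemma filter_ne_getLast?_eq_dropLast (l : List Nat) (hnd : l.Nodup) (s : Nat)
    (hl : l.getLast? = some s) :
    l.filter (fun i => decide (i ≠ s)) = l.dropLast := by
  have hne : l ≠ [] := by intro h; rw [h] at hl; simp at hl
  have hlast : l.getLast hne = s := by
    rw [List.getLast?_eq_getLast hne] at hl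
    exact Option.some_injective _ hl
  have hdecomp : l.dropLast ++ [s] = l := by
    rw [← hlast]; exact List.dropLast_append_getLast hne
  have hnotin : s ∉ l.dropLast := by
    conv at hnd => rw [← hdecomp]
    obtain ⟨-, -, hdisj⟩ := List.nodup_append.mp hnd
    intro hm
    exact hdisj s hm s (List.mem_singleton.mpr rfl) rfl
  conv_lhs => rw [← hdecomp]
  rw [List.filter_append]
  have h1 : l.dropLast.filter (fun i => decide (i ≠ s)) = l.dropLast :=
    List.filter_eq_self.mpr (fun a ha => by
      simp only [decide_eq_true_eq]
      intro h; exact hnotin (h ▸ ha))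
  have h2 : ([s] : List Nat).filter (fun i => decide (i ≠ s)) = [] := by simp
  rw [h1, h2, List.append_nil]

lemma outer_sim (frags : List (List Int)) (hG : Goodf frags) :
    ∀ (s : Nat)
      (st : List Bool × PySem.Dict Int (PySem.Set Nat) × PySem.Dict Int (PySem.Set Nat))
      (rings : List (List Int)) (fuelA : Nat),
      RelB frags st → (∀ i ∈ aliveL st.1, i < s) → (unusedOf frags st.1).length ≤ fuelA →
      outerA fuelA (unusedOf frags st.1) rings = outerB frags s st rings := by
  intro s
  induction s with
  | zero =>
    intro st rings fuelA hR hb hf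
    have halive : aliveL st.1 = [] :=
      List.eq_nil_iff_forall_not_mem.mpr (fun i hi => Nat.not_lt_zero i (hb i hi))
    rw [show unusedOf frags st.1 = [] from by rw [unusedOf, halive]; rfl, outerA_nil]
    rfl
  | succ s ih =>
    intro st rings fuelA hR hb hf
    by_cases hu : st.1.getD s true = true
    · have e1 : outerB frags (s + 1) st rings = outerB frags s st rings := by
        simp only [outerB]
        rw [if_pos hu]
      rw [e1]
      apply ih st rings fuelA hR ?_ hf
      intro i hi
      have h2 := hb i hi
      have h3 := ((mem_aliveL _ _).mp hi).2
      rcases Nat.lt_succ_iff_lt_or_eq.mp h2 with h | h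
      · exact h
      · subst h; rw [h3] at hu; exact absurd hu (by simp)
    · have hu' : st.1.getD s true = false := by
        revert hu; cases st.1.getD s true <;> simp
      have hslt : s < st.1.length := by
        by_contra hcon
        push_neg at hcon
        rw [List.getD_eq_getElem?_getD, List.getElem?_eq_none (by omega)] at hu'
        simp at hu'
      have hsmem : s ∈ aliveL st.1 := (mem_aliveL _ _).mpr ⟨hslt, hu'⟩
      obtain ⟨hlen, hbh, hbt⟩ := hR
      have hlast : (aliveL st.1).getLast? = some s :=
        getLast?_eq_max _ (aliveL_pairwise st.1) s hsmem
          (fun i hi => Nat.lt_succ_iff.mp (hb i hi))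
      have hUlast : (unusedOf frags st.1).getLast? = some (frags.getD s []) := by
        rw [unusedOf, List.getLast?_map, hlast]
        rfl
      have hune : unusedOf frags st.1 ≠ [] := by
        intro h; rw [h] at hUlast; simp at hUlast
      obtain ⟨hR1, halive1⟩ := takeB_rel frags st s ⟨hlen, hbh, hbt⟩ hsmem
      have hdrop : aliveL (takeB frags s st).1 = (aliveL st.1).dropLast := by
        rw [halive1]
        exact filter_ne_getLast?_eq_dropLast _ (aliveL_nodup _) s hlast
      have hrest : unusedOf frags (takeB frags s st).1 = (unusedOf frags st.1).dropLast := by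
        rw [unusedOf, hdrop, unusedOf, List.map_dropLast]
      have hcne : ¬ (frags.getD s [] = []) := by
        have hsltf : s < frags.length := hlen ▸ hslt
        rw [List.getD_eq_getElem _ _ hsltf]
        have hg := hG _ (List.getElem_mem hsltf)
        intro hnil
        rw [hnil] at hg
        simp at hg
      cases fuelA with
      | zero =>
        exfalso
        exact hune (List.eq_nil_of_length_eq_zero (Nat.le_zero.mp hf))
      | succ fA =>
        have hcount : (takeB frags s st).1.count false =
            (unusedOf frags (takeB frags s st).1).length := by
          rw [← length_aliveL, unusedOf, List.length_map]
        simp only [outerA, outerB]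
        rw [if_neg (by simp only [hu']; simp)]
        simp only [hUlast]
        rw [if_neg hcne, hcount, ← hrest]
        obtain ⟨g1, g2, g3, g4⟩ := inner_sim frags hG
          ((unusedOf frags (takeB frags s st).1).length) (frags.getD s [])
          (takeB frags s st) hR1
        rw [g1, g3]
        apply ih _ _ fA g2 ?_ ?_
        · intro i hi
          have hsub := g4 hi
          rw [halive1] at hsub
          obtain ⟨hmem, hnej⟩ := List.mem_filter.mp hsub
          have := hb i hmem
          simp only [decide_eq_true_eq] at hnej
          omega
        · have hsub := List.subperm_of_subset (aliveL_nodup _) g4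
          have hle := hsub.length_le
          have e1 : (unusedOf frags (innerB frags
              ((unusedOf frags (takeB frags s st).1).length) (frags.getD s [])
              (takeB frags s st)).2.1).length =
              (aliveL (innerB frags ((unusedOf frags (takeB frags s st).1).length)
                (frags.getD s []) (takeB frags s st)).2.1).length := by
            rw [unusedOf, List.length_map]
          have e2 : (aliveL (takeB frags s st).1).length =
              (unusedOf frags (takeB frags s st).1).length := by
            rw [unusedOf, List.length_map]
          have e3 : (unusedOf frags (takeB frags s st).1).length =
              (unusedOf frags st.1).length - 1 := by
            rw [hrest, List.length_dropLast]
          omega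

theorem assemble_rings_spec : Claim_equal_assemble_rings := by
  intro ns _
  unfold Spec_assemble_rings
  show assemble_rings ns = assemble_rings_alt ns
  simp only [assemble_rings, assemble_rings_alt]
  have hG : Goodf (ns.filter (fun s => 2 ≤ s.length)) := by
    intro f hf
    have := (List.mem_filter.mp hf).2
    simpa using this
  set frags := ns.filter (fun s => 2 ≤ s.length) with hfr
  have h0 : aliveL (List.replicate frags.length false) = List.range frags.length := by
    unfold aliveL
    rw [List.length_replicate]
    apply List.filter_eq_self.mpr
    intro a ha
    rw [List.getD_replicate _ (List.mem_range.mp ha)]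
    rfl
  have hU0 : unusedOf frags (List.replicate frags.length false) = frags := by
    unfold unusedOf
    rw [h0]
    apply List.ext_getElem (by simp)
    intro i h1 h2
    simp only [List.getElem_map, List.getElem_range]
    rw [List.getD_eq_getElem _ _ h2]
  have hR0 : RelB frags (List.replicate frags.length false, buildIdxB frags) := by
    refine ⟨List.length_replicate, ?_, ?_⟩
    · intro v i
      show i ∈ (buildIdxB frags).1.getD v PySem.Set.empty ↔
        i ∈ aliveL (List.replicate frags.length false) ∧ (frags.getD i []).headI = v
      rw [h0, List.mem_range]
      exact (buildIdxB_mem frags v i).1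
    · intro v i
      show i ∈ (buildIdxB frags).2.getD v PySem.Set.empty ↔
        i ∈ aliveL (List.replicate frags.length false) ∧ (frags.getD i []).getLastD 0 = v
      rw [h0, List.mem_range]
      exact (buildIdxB_mem frags v i).2
  have hres := outer_sim frags hG frags.length
    (List.replicate frags.length false, buildIdxB frags) [] frags.length hR0
    (by
      intro i hi
      have := ((mem_aliveL _ _).mp hi).1
      simpa using this)
    (by rw [hU0])
  rw [hU0] at hres
  exact hres
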